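-- pv_equiv track=rewrite | github.com/Laurancy-Dorian/Projet-Maths-de-la-d-cision | PROJET_PIFE_3/CLR/CLR.py | groupAcceptable
-- ===== SOURCE A (Python) =====
-- criteria = ["TB", "B", "AB", "P", "I", "AR"]
--
-- def groupAcceptable(group, preferences, lvl) :
--
-- 	# Truncate the table if it is too big, its size should be : n(n-1), with n = the number of students in the group
-- 	levels = lvl[0:len(group) * (len(group) - 1)]
--
-- 	for st1 in group :
-- 		for st2 in group :
-- 			if (st1 != st2) :
--
-- 				l = 0
-- 				ok = False
-- 				while l < len(levels) and ok is False:
--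
-- 					# If the first student rated one the second student by one of the levels, then we remove this level from the array (so that it will not be used for another student)
-- 					if (preferences[st1][st2] in criteria[0:levels[l]]):
-- 						levels.pop(l)
-- 						ok = True
--
-- 					l += 1
--
-- 	# If all the levels have been removed, it means that the group is acceptable according to the lvl array
-- 	return len(levels) == 0
-- ===== SOURCE B (Python) =====
-- criteria = ["TB", "B", "AB", "P", "I", "AR"]
--
-- def groupAcceptable(group, preferences, lvl):
--     n = len(group)
--     levels = lvl[0:n * (n - 1)]
--
--     # Bucket the level positions by threshold, capped at 6 (there are only 6
--     # criteria, so any larger threshold accepts every rating); a nonpositive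
--     # threshold accepts nothing and can never be consumed, so it gets no bucket.
--     # The level at position p with threshold t absorbs ratings of rank < t.
--     queues = [[] for _ in range(7)]
--     for pos, t in enumerate(levels):
--         if t > 0:
--             queues[min(t, 6)].append(pos)
--     heads = [0] * 7   # consumed prefix of each bucket
--     removed = 0
--
--     for st1 in group:
--         for st2 in group:
--             if st1 != st2:
--                 p = preferences[st1][st2]
--                 if p in criteria:
--                     r = criteria.index(p)
--                     # leftmost remaining level able to absorb rank r =
--                     # smallest front among the buckets r+1 .. 6
--                     best_pos = None
--                     best_t = -1
--                     for t in range(r + 1, 7):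
--                         if heads[t] < len(queues[t]):
--                             q = queues[t][heads[t]]
--                             if best_pos is None or q < best_pos:
--                                 best_pos = q
--                                 best_t = t
--                     if best_pos is not None:
--                         heads[best_t] += 1
--                         removed += 1
--
--     return removed == len(levels)
-- ===== Notes on version B (the rewrite author's own statement) =====
-- stated objective: alternative
-- what changed: A rescans the whole remaining level list for every ordered pair, testing membership in a freshly built criteria slice at each step; B buckets the level positions once by threshold (capped at 6) into six front-consumed queues and serves each pair by popping the smallest front among the eligible buckets, so no per-pair scan over the levels remains (the n^2 pair loop still dominates both); …
-- outside the precondition, e.g. on groupAcceptable(['a', 'b'], {'a': {'b': 'TB'}, 'b': {'a': 'TB'}}, [-5, -5]): A returns True, B returns False; on groupAcceptable(['a', 'b'], {}, []): A returns True, B raises KeyError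
import Mathlib
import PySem

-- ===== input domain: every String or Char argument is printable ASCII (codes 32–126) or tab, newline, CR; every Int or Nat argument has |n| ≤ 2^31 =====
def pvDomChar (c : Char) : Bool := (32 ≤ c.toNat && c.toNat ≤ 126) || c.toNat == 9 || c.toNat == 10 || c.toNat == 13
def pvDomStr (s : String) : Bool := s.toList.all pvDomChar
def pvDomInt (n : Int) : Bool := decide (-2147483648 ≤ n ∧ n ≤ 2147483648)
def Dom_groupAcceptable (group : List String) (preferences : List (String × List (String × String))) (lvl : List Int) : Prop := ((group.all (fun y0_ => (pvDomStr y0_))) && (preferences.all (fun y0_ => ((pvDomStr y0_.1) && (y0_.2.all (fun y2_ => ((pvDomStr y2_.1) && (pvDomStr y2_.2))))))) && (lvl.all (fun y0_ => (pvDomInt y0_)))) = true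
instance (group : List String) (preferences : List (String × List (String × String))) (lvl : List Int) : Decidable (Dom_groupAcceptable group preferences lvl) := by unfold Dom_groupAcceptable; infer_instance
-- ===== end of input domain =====

-- B replaces A's per-pair linear scans of the level list (with a criteria-slice
-- membership test at every step) by six bucket queues of level positions keyed by
-- threshold, consumed front-first: an alternative algorithm with O(1)-bounded
-- bucket inspection per pair instead of a scan over all levels.

-- ===== PORT A =====
def pvCriteria : List String := ["TB", "B", "AB", "P", "I", "AR"]

-- preferences[st1][st2] (dict-of-dicts lookup; none = KeyError, excluded by Pre_)
def pvPref (preferences : List (String × List (String × String))) (st1 st2 : String) : Option String :=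
  (PySem.Dict.get? (PySem.Dict.mk preferences) st1).bind
    (fun d => PySem.Dict.get? (PySem.Dict.mk d) st2)

-- A's inner while loop: index l, flag ok; levels.pop(l) with l in range is eraseIdx l
-- (PySem.List.pop?_natCast), levels[l] with l in range is pyGetD (PySem.List.pyGetD_eq_getElem)
def pvWhileA (pref : String) (levels : List Int) (l : Nat) (ok : Bool) : List Int :=
  if h : l < levels.length ∧ ok = false then
    if (PySem.List.slice pvCriteria (some 0) (some (PySem.List.pyGetD levels (l : Int) 0))).contains pref then
      pvWhileA pref (levels.eraseIdx l) (l + 1) true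
    else
      pvWhileA pref levels (l + 1) false
  else levels
termination_by levels.length - l
decreasing_by
  · rw [List.length_eraseIdx]; simp only [h.1, if_true]; omega
  · omega

def groupAcceptable (group : List String) (preferences : List (String × List (String × String))) (lvl : List Int) : Bool :=
  let levels := PySem.List.slice lvl (some 0) (some ((group.length : Int) * ((group.length : Int) - 1)))
  let levels := group.foldl (fun levels st1 =>
    group.foldl (fun levels st2 =>
      if st1 ≠ st2 then
        match pvPref preferences st1 st2 with
        | some pref => pvWhileA pref levels 0 false
        | none => levels   -- Python raises KeyError here; outside Pre_
      else levels) levels) levels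
  levels.length == 0

-- ===== PORT B =====
-- queues[min(t, 6)].append(pos) for each (pos, t) in enumerate(levels) with t > 0
def pvBuildQueues (levels : List Int) : List (List Int) :=
  (PySem.List.enumerate levels).foldl
    (fun qs pt =>
      if pt.2 > 0 then
        let t := (min pt.2 6).toNat
        qs.set t (qs.getD t [] ++ [pt.1])
      else qs)
    (List.replicate 7 [])

-- smallest front among the buckets r+1 .. 6 (with the bucket it came from)
def pvSelect (queues : List (List Int)) (heads : List Int) (r : Nat) : Option (Int × Nat) :=
  (PySem.List.pyRange ((r : Int) + 1) 7).foldl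
    (fun best t =>
      let tn := t.toNat
      if heads.getD tn 0 < ((queues.getD tn []).length : Int) then
        let q := PySem.List.pyGetD (queues.getD tn []) (heads.getD tn 0) 0
        match best with
        | none => some (q, tn)
        | some (bq, bt) => if q < bq then some (q, tn) else some (bq, bt)
      else best)
    none

def groupAcceptable_alt (group : List String) (preferences : List (String × List (String × String))) (lvl : List Int) : Bool :=
  let levels := PySem.List.slice lvl (some 0) (some ((group.length : Int) * ((group.length : Int) - 1)))
  let queues := pvBuildQueues levels
  let st := group.foldl (fun st st1 =>
    group.foldl (fun st st2 =>
      if st1 ≠ st2 then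
        match pvPref preferences st1 st2 with
        | some p =>
          match PySem.List.index? pvCriteria p with   -- p in criteria; criteria.index(p)
          | some r =>
            match pvSelect queues st.1 r with
            | some (_, bt) => (st.1.set bt (st.1.getD bt 0 + 1), st.2 + 1)
            | none => st
          | none => st
        | none => st   -- Python raises KeyError here; outside Pre_
      else st) st) (List.replicate 7 (0 : Int), (0 : Int))
  st.2 == (levels.length : Int)

-- ===== PRECONDITION & SPEC =====
-- Pre_ (i) requires a preference entry for every ordered pair of distinct group
-- members (A looks entries up only lazily while levels remain, so it can still
-- return, e.g. on empty lvl, where B's eager lookup raises KeyError), and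
-- (ii) excludes used level thresholds in -5..-1, exactly where A reads a
-- nonempty tail of the criteria list via Python's negative slice bound
-- criteria[0:t] — negative counts lie outside the task's natural domain
-- and B does not match A there.
def Pre_groupAcceptable (group : List String) (preferences : List (String × List (String × String))) (lvl : List Int) : Prop :=
  (∀ st1 ∈ group, ∀ st2 ∈ group, st1 ≠ st2 → (pvPref preferences st1 st2).isSome = true) ∧
  (∀ v ∈ lvl.take (group.length * (group.length - 1)), v ≤ -6 ∨ 0 ≤ v)
instance (group : List String) (preferences : List (String × List (String × String))) (lvl : List Int) : Decidable (Pre_groupAcceptable group preferences lvl) := by unfold Pre_groupAcceptable; infer_instance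

def pvWitness_groupAcceptable : List String × (List (String × List (String × String))) × List Int :=
  (["a", "b"], [("a", [("b", "TB")]), ("b", [("a", "B")])], [2, 1])

def Spec_groupAcceptable (group : List String) (preferences : List (String × List (String × String))) (lvl : List Int) (out : Bool) : Prop := out = groupAcceptable_alt group preferences lvl
instance (group : List String) (preferences : List (String × List (String × String))) (lvl : List Int) (out : Bool) : Decidable (Spec_groupAcceptable group preferences lvl out) := by unfold Spec_groupAcceptable; infer_instance

-- ===== CLAIM (what is proved, stated in full; the proofs are below) =====
def Claim_equal_groupAcceptable : Prop := ∀ (group : List String) (preferences : List (String × List (String × String))) (lvl : List Int), Dom_groupAcceptable group preferences lvl → Pre_groupAcceptable group preferences lvl → Spec_groupAcceptable group preferences lvl (groupAcceptable group preferences lvl)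

-- ===== LEMMAS AND PROOFS =====

-- effective length of the slice criteria[0:v] (Python clamping; proof-side only)
def pvEff (v : Int) : Int :=
  let w := if v < 0 then v + 6 else v
  if w < 0 then 0 else if w > 6 then 6 else w

-- remove the first element satisfying P (what one pass of A's while loop does)
def pvRmF {α : Type} (P : α → Bool) : List α → List α
  | [] => []
  | x :: xs => if P x then xs else x :: pvRmF P xs

-- effective threshold of the level at position p
def pvVal (orig : List Int) (p : Int) : Int := pvEff (PySem.List.pyGetD orig p 0)

theorem pvEff_bounds (v : Int) : 0 ≤ pvEff v ∧ pvEff v ≤ 6 := by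
  simp only [pvEff]; split_ifs <;> omega

theorem pvEff_of_nonneg (v : Int) (h : 0 ≤ v) : pvEff v = min v 6 := by
  simp only [pvEff]; split_ifs <;> omega

theorem pvEff_eq_zero (v : Int) (h : v ≤ -6 ∨ v = 0) : pvEff v = 0 := by
  simp only [pvEff]; split_ifs <;> omega

-- --- characterisation of the criteria-slice membership test ---

theorem pvSliceTake (v : Int) :
    PySem.List.slice pvCriteria (some 0) (some v) = pvCriteria.take (pvEff v).toNat := by
  rw [PySem.List.slice_zero_start]
  by_cases h : 0 ≤ v
  · rw [PySem.List.slice_to _ h]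
    by_cases h2 : v ≤ 6
    · have hv : pvEff v = v := by simp only [pvEff]; split_ifs <;> omega
      rw [hv]
    · have hv : pvEff v = 6 := by simp only [pvEff]; split_ifs <;> omega
      rw [hv, List.take_of_length_le (by have h6 : pvCriteria.length = 6 := rfl; omega),
          List.take_of_length_le (by decide)]
  · obtain ⟨k, hk, rfl⟩ : ∃ k : Nat, 0 < k ∧ v = -(k : Int) :=
      ⟨(-v).toNat, by omega, by omega⟩
    rw [PySem.List.slice_to_neg_natCast _ _ hk]
    congr 1
    show 6 - k = _
    simp only [pvEff]; split_ifs <;> omega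

theorem pvContainsTake (pref : String) (k : Nat) (hk : k ≤ 6) :
    ((pvCriteria.take k).contains pref) =
      (match PySem.List.index? pvCriteria pref with
       | some r => decide (r < k)
       | none => false) := by
  rcases hidx : PySem.List.index? pvCriteria pref with _ | r
  · have hmem : pref ∉ pvCriteria := (PySem.List.index?_eq_none_iff _ _).mp hidx
    have : pref ∉ pvCriteria.take k := fun hm => hmem (List.mem_of_mem_take hm)
    simpa using this
  · obtain ⟨hr, hv, -⟩ := PySem.List.getElem_of_index?_eq_some hidx
    have hr6 : r < 6 := by simpa [pvCriteria] using hr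
    interval_cases r <;> interval_cases k <;>
      (simp only [pvCriteria, List.getElem_cons_zero, List.getElem_cons_succ] at hv;
       subst hv; decide)

theorem pvP_char (pref : String) (v : Int) :
    ((PySem.List.slice pvCriteria (some 0) (some v)).contains pref) =
      (match PySem.List.index? pvCriteria pref with
       | some r => decide ((r : Int) < pvEff v)
       | none => false) := by
  have hb := pvEff_bounds v
  rw [pvSliceTake, pvContainsTake pref _ (by omega)]
  rcases PySem.List.index? pvCriteria pref with _ | r
  · rfl
  · simp only [decide_eq_decide]; omega

-- --- pvRmF (remove first match) lemmas ---

theorem pvRmF_congr {α : Type} (P Q : α → Bool) (h : ∀ x, P x = Q x) :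
    ∀ l : List α, pvRmF P l = pvRmF Q l := by
  intro l; induction l with
  | nil => rfl
  | cons x xs ih => simp only [pvRmF, h x, ih]

theorem pvRmF_map {α β : Type} (P : β → Bool) (f : α → β) :
    ∀ l : List α, pvRmF P (l.map f) = (pvRmF (fun a => P (f a)) l).map f := by
  intro l; induction l with
  | nil => rfl
  | cons x xs ih =>
      simp only [List.map_cons, pvRmF]
      by_cases h : P (f x) <;> simp [h, ih]

theorem pvRmF_of_find?_none {α : Type} (P : α → Bool) :
    ∀ l : List α, l.find? P = none → pvRmF P l = l := by
  intro l; induction l with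
  | nil => intro _; rfl
  | cons x xs ih =>
      intro h
      rw [List.find?_cons] at h
      by_cases hx : P x
      · simp [hx] at h
      · simp only [pvRmF, hx, Bool.false_eq_true, if_false]
        rw [ih (by simpa [hx] using h)]

theorem pvRmF_sublist {α : Type} (P : α → Bool) :
    ∀ l : List α, List.Sublist (pvRmF P l) l := by
  intro l; induction l with
  | nil => exact List.Sublist.refl _
  | cons x xs ih =>
      simp only [pvRmF]
      by_cases h : P x
      · simp only [h, if_true]; exact List.sublist_cons_self x xs
      · simp only [h, Bool.false_eq_true, if_false]; exact ih.cons₂ x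

theorem pvRmF_length {α : Type} (P : α → Bool) :
    ∀ (l : List α) (p : α), l.find? P = some p → (pvRmF P l).length + 1 = l.length := by
  intro l; induction l with
  | nil => intro p h; simp at h
  | cons x xs ih =>
      intro p h
      rw [List.find?_cons] at h
      by_cases hx : P x
      · simp [pvRmF, hx]
      · simp only [hx] at h  -- find? xs = some p
        simp only [pvRmF, hx, Bool.false_eq_true, if_false, List.length_cons]
        rw [ih p (by simpa [hx] using h)]

theorem pvRmF_filter {α : Type} (val : α → Int) (r : Int) :
    ∀ (l : List α) (p : α),
      l.find? (fun q => decide (r < val q)) = some p → ∀ t : Int,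
      (pvRmF (fun q => decide (r < val q)) l).filter (fun q => val q == t)
        = if val p == t then (l.filter (fun q => val q == t)).tail
          else l.filter (fun q => val q == t) := by
  intro l; induction l with
  | nil => intro p h; simp at h
  | cons x xs ih =>
      intro p h t
      by_cases hx : r < val x
      · have hp : p = x := by
          have := List.find?_cons_of_pos (l := xs) (p := fun q => decide (r < val q))
            (a := x) (by simpa using hx)
          rw [this] at h; exact (Option.some.inj h).symm
        subst hp
        simp only [pvRmF, hx, decide_true, if_true]
        by_cases ht : val p == t <;> simp [ht]
      · have hfind : xs.find? (fun q => decide (r < val q)) = some p := by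
          rw [List.find?_cons_of_neg (by simpa using hx)] at h; exact h
        have hpe : r < val p := by
          have := List.find?_some hfind; simpa using this
        have hne : val x ≠ val p := by omega
        simp only [pvRmF, hx, decide_false, Bool.false_eq_true, if_false, List.filter_cons]
        rw [ih p hfind t]
        by_cases hpt : val p == t
        · have hxt : (val x == t) = false := by
            have : val p = t := by simpa using hpt
            simp only [beq_eq_false_iff_ne]; omega
          simp only [hxt, Bool.false_eq_true, if_false, hpt, if_true]
        · simp only [hpt, Bool.false_eq_true, if_false]

-- --- A's while loop removes the first matching level ---

theorem pvWhileA_stop (pref : String) (levels : List Int) (l : Nat) :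
    pvWhileA pref levels l true = levels := by
  rw [pvWhileA]; simp

theorem pvWhileA_char (pref : String) (levels : List Int) :
    ∀ (n l : Nat), levels.length - l = n →
      pvWhileA pref levels l false =
        levels.take l ++
          pvRmF (fun v => (PySem.List.slice pvCriteria (some 0) (some v)).contains pref)
            (levels.drop l) := by
  intro n
  induction n with
  | zero =>
      intro l hl
      have hle : levels.length ≤ l := by omega
      rw [pvWhileA, dif_neg (by omega)]
      rw [List.take_of_length_le hle, List.drop_eq_nil_of_le hle]
      simp [pvRmF]
  | succ n ih =>
      intro l hl
      have hlt : l < levels.length := by omega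
      rw [pvWhileA, dif_pos ⟨hlt, rfl⟩]
      have hget : PySem.List.pyGetD levels (l : Int) 0 = levels[l] := by
        rw [PySem.List.pyGetD_eq_getElem levels 0 (by omega) (by exact_mod_cast hlt)]
        simp
      have hdrop : levels.drop l = levels[l] :: levels.drop (l + 1) :=
        List.drop_eq_getElem_cons hlt
      rw [hget]
      by_cases hP : (PySem.List.slice pvCriteria (some 0) (some levels[l])).contains pref
      · rw [if_pos hP, pvWhileA_stop, hdrop]
        simp only [pvRmF, hP, if_true]
        rw [List.eraseIdx_eq_take_drop_succ]
      · rw [if_neg hP, ih (l + 1) (by omega), hdrop]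
        simp only [pvRmF, hP, Bool.false_eq_true, if_false]
        have ht1 : levels.take (l + 1) = levels.take l ++ [levels[l]] := by
          rw [List.take_add_one, List.getElem?_eq_getElem hlt]; rfl
        rw [ht1, List.append_assoc, List.singleton_append]

theorem pvWhileA_zero (pref : String) (levels : List Int) :
    pvWhileA pref levels 0 false =
      pvRmF (fun v => (PySem.List.slice pvCriteria (some 0) (some v)).contains pref) levels := by
  simpa using pvWhileA_char pref levels levels.length 0 rfl

-- --- abstract form of pvSelect's fold ---

def pvFoldSel (F : Int → Option Int) (T : List Int) (acc : Option (Int × Nat)) :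
    Option (Int × Nat) :=
  T.foldl (fun best t =>
    match F t with
    | some q =>
      match best with
      | none => some (q, t.toNat)
      | some (bq, bt) => if q < bq then some (q, t.toNat) else some (bq, bt)
    | none => best) acc

theorem pvFoldSel_congr (F G : Int → Option Int) :
    ∀ (T : List Int), (∀ t ∈ T, F t = G t) → ∀ acc, pvFoldSel F T acc = pvFoldSel G T acc := by
  intro T
  induction T with
  | nil => intro _ acc; rfl
  | cons t T' ih =>
      intro h acc
      simp only [pvFoldSel, List.foldl_cons]
      rw [h t (by simp)]
      exact ih (fun u hu => h u (by simp [hu])) _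

theorem pvFoldSel_none (F : Int → Option Int) :
    ∀ (T : List Int), (∀ t ∈ T, F t = none) → ∀ acc, pvFoldSel F T acc = acc := by
  intro T
  induction T with
  | nil => intro _ acc; rfl
  | cons t T' ih =>
      intro h acc
      simp only [pvFoldSel, List.foldl_cons, h t (by simp)]
      exact ih (fun u hu => h u (by simp [hu])) acc

theorem pvFoldSel_stop (F : Int → Option Int) :
    ∀ (T : List Int) (p : Int) (t0 : Nat),
      (∀ t ∈ T, ∀ q, F t = some q → ¬ q < p) →
      pvFoldSel F T (some (p, t0)) = some (p, t0) := by
  intro T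
  induction T with
  | nil => intro p t0 _; rfl
  | cons t T' ih =>
      intro p t0 h
      simp only [pvFoldSel, List.foldl_cons]
      rcases hF : F t with _ | q
      · exact ih p t0 (fun u hu => h u (by simp [hu]))
      · have : ¬ q < p := h t (by simp) q hF
        simp only [this, if_false]
        exact ih p t0 (fun u hu => h u (by simp [hu]))

theorem pvFoldSel_min (F : Int → Option Int) :
    ∀ (T : List Int) (acc : Option (Int × Nat)) (t0 p : Int),
      t0 ∈ T → F t0 = some p →
      (∀ t ∈ T, ∀ q, F t = some q → p ≤ q) →
      (∀ t ∈ T, t ≠ t0 → ∀ q, F t = some q → p < q) →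
      (acc = none ∨ ∃ bq bt, acc = some (bq, bt) ∧ p < bq) →
      pvFoldSel F T acc = some (p, t0.toNat) := by
  intro T
  induction T with
  | nil => intro acc t0 p h; simp at h
  | cons t T' ih =>
      intro acc t0 p hmem hF hle hlt hacc
      simp only [pvFoldSel, List.foldl_cons]
      by_cases ht : t = t0
      · subst ht
        have hstop := pvFoldSel_stop F T' p t.toNat
          (fun u hu q hq => not_lt.mpr (hle u (by simp [hu]) q hq))
        rcases hacc with rfl | ⟨bq, bt, rfl, hbq⟩
        · simpa [pvFoldSel, hF] using hstop
        · simpa [pvFoldSel, hF, hbq] using hstop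
      · have hmem' : t0 ∈ T' := by
          rcases List.mem_cons.mp hmem with h | h
          · exact absurd h.symm ht
          · exact h
        rcases hF' : F t with _ | q
        · have := ih acc t0 p hmem' hF (fun u hu => hle u (by simp [hu]))
            (fun u hu => hlt u (by simp [hu])) hacc
          simpa only [pvFoldSel, List.foldl_cons, hF'] using this
        · have hpq : p < q := hlt t (by simp) ht q hF'
          have step : (match acc with
              | none => some (q, t.toNat)
              | some (bq, bt) => if q < bq then some (q, t.toNat) else some (bq, bt))
              = none ∨ ∃ bq bt, (match acc with
              | none => some (q, t.toNat)
              | some (bq, bt) => if q < bq then some (q, t.toNat) else some (bq, bt))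
              = some (bq, bt) ∧ p < bq := by
            rcases hacc with rfl | ⟨bq, bt, rfl, hbq⟩
            · exact Or.inr ⟨q, t.toNat, rfl, hpq⟩
            · by_cases hqb : q < bq
              · exact Or.inr ⟨q, t.toNat, by simp [hqb], hpq⟩
              · exact Or.inr ⟨bq, bt, by simp [hqb], hbq⟩
          have := ih _ t0 p hmem' hF (fun u hu => hle u (by simp [hu]))
            (fun u hu => hlt u (by simp [hu])) step
          simpa only [pvFoldSel, List.foldl_cons, hF'] using this

theorem pvHeadMem {α : Type} (L : List α) (q : α) (h : L.head? = some q) : q ∈ L := by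
  cases L with
  | nil => simp at h
  | cons a L =>
      simp only [List.head?_cons, Option.some.injEq] at h
      subst h; exact List.mem_cons_self ..

-- --- the bucket-front minimum is the first eligible remaining position ---

theorem pvSel_find (orig : List Int) (r : Nat) :
    ∀ S : List Int, S.Pairwise (· < ·) →
      pvFoldSel (fun t => (S.filter (fun p => pvVal orig p == t)).head?)
          (PySem.List.pyRange ((r : Int) + 1) 7) none
        = (S.find? (fun p => decide ((r : Int) < pvVal orig p))).map
            (fun p => (p, (pvVal orig p).toNat)) := by
  intro S
  induction S with
  | nil =>
      intro _
      rw [pvFoldSel_none _ _ (fun t _ => by simp)]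
      simp
  | cons p0 S' ih =>
      intro hpair
      have h0 : ∀ q ∈ S', p0 < q := (List.pairwise_cons.mp hpair).1
      have hS' := (List.pairwise_cons.mp hpair).2
      have hvb := pvEff_bounds (PySem.List.pyGetD orig p0 0)
      by_cases he : (r : Int) < pvVal orig p0
      · have hmem : pvVal orig p0 ∈ PySem.List.pyRange ((r : Int) + 1) 7 :=
          PySem.List.mem_pyRange_one.mpr ⟨by omega, by unfold pvVal; omega⟩
        rw [pvFoldSel_min _ _ none (pvVal orig p0) p0 hmem
            (by rw [List.filter_cons]; simp)
            ?hle ?hlt (Or.inl rfl)]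
        · rw [List.find?_cons_of_pos (by simpa using he)]
          rfl
        case hle =>
          intro t ht q hq
          rw [List.filter_cons] at hq
          by_cases hbt : pvVal orig p0 == t
          · rw [if_pos (by simpa using hbt)] at hq
            simp only [List.head?_cons, Option.some.injEq] at hq
            omega
          · rw [if_neg (by simpa using hbt)] at hq
            have hqm : q ∈ S'.filter (fun p => pvVal orig p == t) := pvHeadMem _ _ hq
            have := h0 q (List.mem_of_mem_filter hqm)
            omega
        case hlt =>
          intro t ht htne q hq
          rw [List.filter_cons] at hq
          have hbt : (pvVal orig p0 == t) = false := by
            simp only [beq_eq_false_iff_ne]; exact fun hc => htne hc.symm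
          rw [if_neg (by simp [hbt])] at hq
          exact h0 q (List.mem_of_mem_filter (pvHeadMem _ _ hq))
      · have hskip : ∀ t ∈ PySem.List.pyRange ((r : Int) + 1) 7,
            (((p0 :: S').filter (fun p => pvVal orig p == t)).head? : Option Int)
              = (S'.filter (fun p => pvVal orig p == t)).head? := by
          intro t ht
          have hrt := PySem.List.mem_pyRange_one.mp ht
          have hbt : (pvVal orig p0 == t) = false := by
            simp only [beq_eq_false_iff_ne]; omega
          rw [List.filter_cons, if_neg (by simp [hbt])]
        rw [pvFoldSel_congr _ _ _ hskip none, ih hS',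
            List.find?_cons_of_neg (by simpa using he)]

-- --- pvSelect equals the abstract fold under the bucket invariant ---
-- (the invariant only covers buckets 1..6; bucket 0 is never queried since r ≥ 0)

theorem pvSelect_eq (orig : List Int) (queues : List (List Int)) (heads : List Int)
    (r : Nat) (S : List Int)
    (hq : ∀ t : Nat, 1 ≤ t → t < 7 → ∃ h : Nat, heads.getD t 0 = (h : Int) ∧
      (queues.getD t []).drop h = S.filter (fun p => pvVal orig p == (t : Int))) :
    pvSelect queues heads r
      = pvFoldSel (fun t => (S.filter (fun p => pvVal orig p == t)).head?)
          (PySem.List.pyRange ((r : Int) + 1) 7) none := by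
  unfold pvSelect pvFoldSel
  apply PySem.List.foldl_congr_mem
  intro acc t ht
  dsimp only
  have ht' := PySem.List.mem_pyRange_one.mp ht
  have htn : ((t.toNat : Nat) : Int) = t := by omega
  obtain ⟨h, hh, hd⟩ := hq t.toNat (by omega) (by omega)
  rw [htn] at hd
  rw [hh]
  rcases hfil : (S.filter (fun p => pvVal orig p == t)).head? with _ | q
  · have hnil : (queues.getD t.toNat []).drop h = [] := by
      rw [hd]; exact List.head?_eq_none_iff.mp hfil
    have hlen : (queues.getD t.toNat []).length ≤ h := by
      simpa using List.drop_eq_nil_iff.mp hnil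
    rw [if_neg (by omega)]
  · have hcons : (queues.getD t.toNat []).drop h ≠ [] := by
      rw [hd]; intro hc; rw [hc] at hfil; simp at hfil
    have hlen : h < (queues.getD t.toNat []).length := by
      by_contra hc
      exact hcons (List.drop_eq_nil_iff.mpr (by omega))
    have hget : (queues.getD t.toNat [])[h]? = some q := by
      rw [← List.head?_drop, hd, hfil]
    have hgetD : PySem.List.pyGetD (queues.getD t.toNat []) ((h : Nat) : Int) 0 = q := by
      rw [PySem.List.pyGetD_eq_getElem _ 0 (by omega) (by exact_mod_cast hlen)]
      simp only [Int.toNat_natCast]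
      rw [List.getElem?_eq_getElem hlen] at hget
      exact Option.some.inj hget
    rw [if_pos (by omega), hgetD]

-- --- the bucket construction (under Pre_: no threshold in -5..-1) ---

theorem pvBuild_aux (levels : List Int) (hnn : ∀ v ∈ levels, v ≤ -6 ∨ 0 ≤ v) :
    ∀ (T : List Int) (qs : List (List Int)), qs.length = 7 → ∀ t : Nat, 1 ≤ t → t < 7 →
      ((T.foldl (fun qs j =>
          if PySem.List.pyGetD levels j 0 > 0 then
            qs.set (min (PySem.List.pyGetD levels j 0) 6).toNat
              (qs.getD (min (PySem.List.pyGetD levels j 0) 6).toNat [] ++ [j])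
          else qs) qs).getD t [])
        = qs.getD t [] ++ T.filter (fun p => pvVal levels p == (t : Int)) := by
  intro T
  induction T with
  | nil => intro qs _ t _ _; simp
  | cons p T' ih =>
      intro qs hqs t ht1 ht
      have hv0 : PySem.List.pyGetD levels p 0 ≤ -6 ∨ 0 ≤ PySem.List.pyGetD levels p 0 := by
        by_cases hin : PySem.Raise.InRange levels.length p
        · exact hnn _ (PySem.List.pyGetD_mem (xs := levels) (i := p) (d := 0) hin)
        · have hnone : PySem.List.pyGet? levels p = none :=
            (PySem.List.pyGet?_eq_none_iff _ _).mpr hin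
          simp [PySem.List.pyGetD, hnone]
      rw [List.foldl_cons, List.filter_cons]
      by_cases hpos : PySem.List.pyGetD levels p 0 > 0
      · have heq : pvVal levels p = min (PySem.List.pyGetD levels p 0) 6 := by
          unfold pvVal; exact pvEff_of_nonneg _ (by omega)
        rw [if_pos hpos]
        have hkey : (min (PySem.List.pyGetD levels p 0) 6).toNat < 7 := by omega
        rw [ih _ (by rw [List.length_set]; exact hqs) t ht1 ht]
        by_cases hteq : (min (PySem.List.pyGetD levels p 0) 6).toNat = t
        · have hbeq : (pvVal levels p == (t : Int)) = true := by
            simp only [beq_iff_eq]; omega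
          rw [if_pos hbeq]
          rw [List.getD_eq_getElem?_getD, ← hteq, List.getElem?_set_self (by omega),
              Option.getD_some, List.getD_eq_getElem?_getD, List.append_assoc]
          rfl
        · have hbeq : (pvVal levels p == (t : Int)) = false := by
            simp only [beq_eq_false_iff_ne]; omega
          rw [if_neg (by simp [hbeq])]
          rw [List.getD_eq_getElem?_getD, List.getElem?_set_ne hteq, ← List.getD_eq_getElem?_getD]
      · have heq : pvVal levels p = 0 := by
          unfold pvVal; exact pvEff_eq_zero _ (by omega)
        rw [if_neg hpos]
        have hbeq : (pvVal levels p == (t : Int)) = false := by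
          simp only [beq_eq_false_iff_ne]; omega
        rw [if_neg (by simp [hbeq])]
        exact ih qs hqs t ht1 ht

theorem pvBuildQueues_spec (levels : List Int) (hnn : ∀ v ∈ levels, v ≤ -6 ∨ 0 ≤ v)
    (t : Nat) (ht1 : 1 ≤ t) (ht : t < 7) :
    (pvBuildQueues levels).getD t []
      = (PySem.List.pyRange 0 (levels.length : Int)).filter
          (fun p => pvVal levels p == (t : Int)) := by
  unfold pvBuildQueues
  rw [PySem.List.enumerate_eq_map_pyRange (d := 0), List.foldl_map]
  simp only [PySem.List.len_eq]
  rw [pvBuild_aux levels hnn _ _ (by simp) t ht1 ht]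
  have : (List.replicate 7 ([] : List Int)).getD t [] = [] := by
    rw [List.getD_eq_getElem?_getD, List.getElem?_replicate]
    simp [ht]
  rw [this, List.nil_append]

-- --- the simulation invariant ---

def pvInv (orig : List Int) (queues : List (List Int)) (levels : List Int)
    (st : List Int × Int) : Prop :=
  ∃ S : List Int, S.Pairwise (· < ·) ∧
    levels = S.map (fun p => PySem.List.pyGetD orig p 0) ∧
    st.1.length = 7 ∧
    (∀ t : Nat, 1 ≤ t → t < 7 → ∃ h : Nat, st.1.getD t 0 = (h : Int) ∧
        (queues.getD t []).drop h = S.filter (fun p => pvVal orig p == (t : Int))) ∧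
    st.2 + (S.length : Int) = (orig.length : Int)

theorem pvStep (orig : List Int) (queues : List (List Int))
    (preferences : List (String × List (String × String))) (st1 st2 : String)
    (levels : List Int) (st : List Int × Int) (hinv : pvInv orig queues levels st) :
    pvInv orig queues
      (if st1 ≠ st2 then
        match pvPref preferences st1 st2 with
        | some pref => pvWhileA pref levels 0 false
        | none => levels
       else levels)
      (if st1 ≠ st2 then
        match pvPref preferences st1 st2 with
        | some p =>
          match PySem.List.index? pvCriteria p with
          | some r =>
            match pvSelect queues st.1 r with
            | some (_, bt) => (st.1.set bt (st.1.getD bt 0 + 1), st.2 + 1)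
            | none => st
          | none => st
        | none => st
       else st) := by
  by_cases hne : st1 ≠ st2
  · rw [if_pos hne, if_pos hne]
    rcases hpp : pvPref preferences st1 st2 with _ | pref
    · exact hinv
    · obtain ⟨S, hsort, hlev, hhlen, hq, hcnt⟩ := hinv
      dsimp only
      rw [pvWhileA_zero]
      rcases hidx : PySem.List.index? pvCriteria pref with _ | r
      all_goals dsimp only
      · -- pref not a criterion: no level matches, nothing changes
        have hfalse : ∀ v : Int,
            ((PySem.List.slice pvCriteria (some 0) (some v)).contains pref) = false := by
          intro v; rw [pvP_char, hidx]
        have : pvRmF (fun v => (PySem.List.slice pvCriteria (some 0) (some v)).contains pref)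
            levels = levels := by
          apply pvRmF_of_find?_none
          rw [List.find?_eq_none]
          intro x _
          simp only [hfalse x]
          exact Bool.false_ne_true
        rw [this]
        exact ⟨S, hsort, hlev, hhlen, hq, hcnt⟩
      · -- pref has rank r: A removes the first level with eff > r
        have hPmap : pvRmF (fun v =>
              (PySem.List.slice pvCriteria (some 0) (some v)).contains pref) levels
            = (pvRmF (fun p => decide ((r : Int) < pvVal orig p)) S).map
                (fun p => PySem.List.pyGetD orig p 0) := by
          rw [hlev, pvRmF_map]
          congr 1
          apply pvRmF_congr
          intro p
          rw [pvP_char, hidx]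
          rfl
        have hsel : pvSelect queues st.1 r
            = (S.find? (fun p => decide ((r : Int) < pvVal orig p))).map
                (fun p => (p, (pvVal orig p).toNat)) := by
          rw [pvSelect_eq orig queues st.1 r S hq, pvSel_find orig r S hsort]
        rcases hfind : S.find? (fun p => decide ((r : Int) < pvVal orig p)) with _ | pstar
        · rw [hsel, hfind]
          dsimp only [Option.map_none]
          have : pvRmF (fun p => decide ((r : Int) < pvVal orig p)) S = S :=
            pvRmF_of_find?_none _ S hfind
          rw [hPmap, this, ← hlev]
          exact ⟨S, hsort, hlev, hhlen, hq, hcnt⟩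
        · rw [hsel, hfind]
          dsimp only [Option.map_some]
          have hvb := pvEff_bounds (PySem.List.pyGetD orig pstar 0)
          have hrlt : (r : Int) < pvVal orig pstar := by
            have := List.find?_some hfind; simpa using this
          have htstar1 : 1 ≤ (pvVal orig pstar).toNat := by unfold pvVal at *; omega
          have htstar : (pvVal orig pstar).toNat < 7 := by unfold pvVal at *; omega
          refine ⟨pvRmF (fun p => decide ((r : Int) < pvVal orig p)) S,
            hsort.sublist (pvRmF_sublist _ S), hPmap, ?_, ?_, ?_⟩
          · simp [List.length_set, hhlen]
          · intro t ht1 ht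
            obtain ⟨h, hh, hd⟩ := hq t ht1 ht
            by_cases hteq : t = (pvVal orig pstar).toNat
            · refine ⟨h + 1, ?_, ?_⟩
              · subst hteq
                rw [List.getD_eq_getElem?_getD, List.getElem?_set_self (by omega),
                    Option.getD_some, hh]
                push_cast; ring
              · subst hteq
                rw [← List.tail_drop, hd, pvRmF_filter _ _ S pstar hfind]
                rw [if_pos (by simp only [beq_iff_eq]; unfold pvVal at *; omega)]
            · refine ⟨h, ?_, ?_⟩
              · rw [List.getD_eq_getElem?_getD,
                    List.getElem?_set_ne (fun hc => hteq hc.symm),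
                    ← List.getD_eq_getElem?_getD, hh]
              · rw [hd, pvRmF_filter _ _ S pstar hfind]
                rw [if_neg ?_]
                simp only [beq_iff_eq]
                unfold pvVal at *
                intro hc
                apply hteq
                omega
          · have := pvRmF_length (fun p => decide ((r : Int) < pvVal orig p)) S pstar hfind
            simp only []
            omega
  · rw [if_neg hne, if_neg hne]
    exact hinv

-- --- folds preserve a relation ---

theorem pvFoldlRel {α β ι : Type} (R : α → β → Prop) (f : α → ι → α) (g : β → ι → β)
    (h : ∀ a b i, R a b → R (f a i) (g b i)) :
    ∀ (l : List ι) (a : α) (b : β), R a b → R (l.foldl f a) (l.foldl g b) := by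
  intro l
  induction l with
  | nil => intro a b hr; exact hr
  | cons x xs ih => intro a b hr; exact ih _ _ (h a b x hr)

-- --- initial state and final extraction ---

theorem pvInit (orig : List Int) (hnn : ∀ v ∈ orig, v ≤ -6 ∨ 0 ≤ v) :
    pvInv orig (pvBuildQueues orig) orig (List.replicate 7 (0 : Int), (0 : Int)) := by
  refine ⟨PySem.List.pyRange 0 (orig.length : Int),
    PySem.List.pairwise_lt_pyRange_one _ _, ?_, by simp, ?_, ?_⟩
  · exact (PySem.List.map_pyGetD_pyRange_zero' orig 0).symm
  · intro t ht1 ht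
    refine ⟨0, ?_, ?_⟩
    · rw [List.getD_eq_getElem?_getD, List.getElem?_replicate]
      simp [ht]
    · rw [List.drop_zero, pvBuildQueues_spec orig hnn t ht1 ht]
  · rw [PySem.List.length_pyRange_one]
    simp

theorem pvFinal (orig : List Int) (queues : List (List Int)) (levels : List Int)
    (st : List Int × Int) (h : pvInv orig queues levels st) :
    (levels.length == 0) = (st.2 == (orig.length : Int)) := by
  obtain ⟨S, -, hlev, -, -, hcnt⟩ := h
  have hl : levels.length = S.length := by rw [hlev]; simp
  rw [Bool.eq_iff_iff]
  simp only [beq_iff_eq]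
  omega

-- the truncated prefix (as A and B slice it) is exactly List.take n(n-1)
theorem pvSliceIsTake (lvl : List Int) (n : Nat) :
    PySem.List.slice lvl (some 0) (some ((n : Int) * ((n : Int) - 1)))
      = lvl.take (n * (n - 1)) := by
  have hm : 0 ≤ (n : Int) * ((n : Int) - 1) := by
    rcases Nat.eq_zero_or_pos n with h | h
    · subst h; simp
    · exact mul_nonneg (by positivity) (by omega)
  rw [PySem.List.slice_zero_start, PySem.List.slice_to _ hm]
  congr 1
  rcases Nat.eq_zero_or_pos n with h | h
  · subst h; simp
  · have : (n : Int) * ((n : Int) - 1) = ((n * (n - 1) : Nat) : Int) := by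
      push_cast [Nat.cast_sub h]; ring
    rw [this, Int.toNat_natCast]

-- ===== VERDICT (by name: the statement is the Claim_ definition above) =====
theorem groupAcceptable_spec : Claim_equal_groupAcceptable := by
  intro group preferences lvl _dom hpre
  unfold Spec_groupAcceptable groupAcceptable groupAcceptable_alt
  have hnn : ∀ v ∈ PySem.List.slice lvl (some 0)
      (some ((group.length : Int) * ((group.length : Int) - 1))), v ≤ -6 ∨ 0 ≤ v := by
    rw [pvSliceIsTake]
    exact hpre.2
  apply pvFinal _ (pvBuildQueues
    (PySem.List.slice lvl (some 0) (some ((group.length : Int) * ((group.length : Int) - 1)))))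
  exact pvFoldlRel _ _ _
    (fun a b st1 hr => pvFoldlRel _ _ _
      (fun a' b' st2 hr' => pvStep _ _ preferences st1 st2 a' b' hr') group a b hr)
    group _ _ (pvInit _ hnn)
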